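-- pv_equiv track=rewrite | github.com/Code2Bench/Code2Bench | code2bench/utils/python.py | extract_typing_imports
-- ===== SOURCE A (Python) =====
-- from typing import Dict, List
--
-- def extract_typing_imports(type_hints: List[str]) -> str:
--     # 定义 typing 模块中的常用类型
--     typing_types = {
--         "List", "Dict", "Union", "Optional", "Tuple", "Set", "FrozenSet",
--         "Callable", "Type", "Any", "Sequence", "Iterable", "Mapping", "Generator"
--     }
--
--     # 用于存储需要导入的类型
--     imports_needed = set()
--
--     # 遍历 typing_types，检查是否在 type_hints 中出现
--     for typing_type in typing_types:
--         if any(typing_type in hint for hint in type_hints):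
--             imports_needed.add(typing_type)
--
--     # 生成 from typing import ... 的导入语句
--     if imports_needed:
--         return f"from typing import {', '.join(sorted(imports_needed))}"
--     return ""
-- ===== SOURCE B (Python) =====
-- def extract_typing_imports(type_hints):
--     # Single pass over the hints: keep the names not yet seen, partition them
--     # against each hint, and stop as soon as every name has been found.
--     remaining = ["Any", "Callable", "Dict", "FrozenSet", "Generator",
--                  "Iterable", "List", "Mapping", "Optional", "Sequence",
--                  "Set", "Tuple", "Type", "Union"]
--     found = []
--     for hint in type_hints:
--         if not remaining:
--             break
--         still = []
--         for n in remaining: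
--             (found if n in hint else still).append(n)
--         remaining = still
--     if not found:
--         return ""
--     return "from typing import " + ", ".join(sorted(found))
-- ===== Notes on version B (the rewrite author's own statement) =====
-- stated objective: alternative
-- what changed: B inverts the loop nesting: one pass over the hints with a shrinking worklist of not-yet-found names (partitioned per hint, early break when empty) instead of A's per-name scan over all hints; the matched names are sorted once at the end.
import Mathlib
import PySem

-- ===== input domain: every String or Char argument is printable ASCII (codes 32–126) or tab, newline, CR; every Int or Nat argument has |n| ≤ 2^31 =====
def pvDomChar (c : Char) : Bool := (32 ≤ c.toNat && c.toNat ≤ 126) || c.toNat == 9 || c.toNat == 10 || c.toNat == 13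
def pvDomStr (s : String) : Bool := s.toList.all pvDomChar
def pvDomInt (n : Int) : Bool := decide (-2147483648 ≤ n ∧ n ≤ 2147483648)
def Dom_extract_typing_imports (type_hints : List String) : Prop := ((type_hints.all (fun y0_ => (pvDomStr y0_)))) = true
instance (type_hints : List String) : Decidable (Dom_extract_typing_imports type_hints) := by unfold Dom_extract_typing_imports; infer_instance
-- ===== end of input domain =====

-- B inverts the loop nesting: one pass over the hints with a shrinking worklist of
-- not-yet-found names (early break when empty), sorting the matches once at the end;
-- objective: alternative (same cost, different traversal).

-- ===== PORT A =====
-- the typing_types set literal, in source order (the result is order-independent: it is sorted)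
def pvNamesA : List String :=
  ["List", "Dict", "Union", "Optional", "Tuple", "Set", "FrozenSet",
   "Callable", "Type", "Any", "Sequence", "Iterable", "Mapping", "Generator"]

def extract_typing_imports (type_hints : List String) : String :=
  let imports_needed : PySem.Set String :=
    pvNamesA.foldl
      (fun acc typing_type =>
        if type_hints.any (fun hint => PySem.Str.isIn typing_type hint)
        then PySem.Set.add acc typing_type else acc) []
  if imports_needed ≠ [] then
    "from typing import " ++ PySem.Str.join ", " (PySem.List.sorted imports_needed (fun x => x))
  else ""

-- ===== PORT B =====
-- the initial worklist of Source B
def pvNamesB : List String :=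
  ["Any", "Callable", "Dict", "FrozenSet", "Generator", "Iterable",
   "List", "Mapping", "Optional", "Sequence", "Set", "Tuple", "Type", "Union"]

-- the for-loop over the hints: state = (found, remaining), break when remaining is empty;
-- the inner for-loop partitions remaining against the current hint
def pvLoopB : List String → List String → List String → List String
  | [], found, _ => found
  | hint :: t, found, remaining =>
    if remaining = [] then found
    else
      let st := remaining.foldl
        (fun (st : List String × List String) n =>
          if PySem.Str.isIn n hint then (st.1 ++ [n], st.2) else (st.1, st.2 ++ [n]))
        (found, [])
      pvLoopB t st.1 st.2

def extract_typing_imports_alt (type_hints : List String) : String :=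
  let found := pvLoopB type_hints [] pvNamesB
  if found = [] then ""
  else "from typing import " ++ PySem.Str.join ", " (PySem.List.sorted found (fun x => x))

-- ===== PRECONDITION & SPEC =====
def Spec_extract_typing_imports (type_hints : List String) (out : String) : Prop := out = extract_typing_imports_alt type_hints
instance (type_hints : List String) (out : String) : Decidable (Spec_extract_typing_imports type_hints out) := by unfold Spec_extract_typing_imports; infer_instance

-- ===== CLAIM =====
def Claim_equal_extract_typing_imports : Prop := ∀ (type_hints : List String), Dom_extract_typing_imports type_hints → Spec_extract_typing_imports type_hints (extract_typing_imports type_hints)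

-- ===== LEMMAS AND PROOFS =====

-- B's inner partition fold, in closed form (any predicate)
lemma partition_foldl {α : Type} (p : α → Bool) :
    ∀ (rem : List α) (f s : List α),
      rem.foldl (fun (st : List α × List α) n =>
          if p n then (st.1 ++ [n], st.2) else (st.1, st.2 ++ [n])) (f, s)
        = (f ++ rem.filter p, s ++ rem.filter (fun n => !p n)) := by
  intro rem
  induction rem with
  | nil => intro f s; simp
  | cons a t ih =>
    intro f s
    by_cases h : p a = true
    · rw [List.foldl_cons, if_pos h, ih]
      simp [h]
    · rw [List.foldl_cons, if_neg h, ih]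
      simp [h]

-- filter by a disjunction splits into two filters, up to permutation
lemma filter_or_perm {α : Type} (p q : α → Bool) (l : List α) :
    (l.filter (fun a => p a || q a)).Perm
      (l.filter p ++ (l.filter (fun a => !p a)).filter q) := by
  induction l with
  | nil => simp
  | cons a t ih =>
    by_cases hp : p a = true
    · simpa [hp] using ih.cons a
    · by_cases hq : q a = true
      · simp only [List.filter_cons, hp, hq]
        simpa [hp, hq] using (ih.cons a).trans List.perm_middle.symm
      · simpa [hp, hq, List.filter_filter, Bool.and_comm] using ih

-- the hint loop collects, up to permutation, the remaining names matched by some hint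
lemma loopB_perm :
    ∀ (hints found remaining : List String),
      (pvLoopB hints found remaining).Perm
        (found ++ remaining.filter (fun n => hints.any (fun hint => PySem.Str.isIn n hint))) := by
  intro hints
  induction hints with
  | nil => intro found remaining; simp [pvLoopB]
  | cons h t ih =>
    intro found remaining
    by_cases hr : remaining = []
    · simp [pvLoopB, hr]
    · rw [pvLoopB, if_neg hr]
      simp only [partition_foldl]
      refine (ih _ _).trans ?_
      rw [List.append_assoc]
      refine List.Perm.append_left found ?_
      simpa using (filter_or_perm (fun n => PySem.Str.isIn n h)
        (fun n => t.any (fun hint => PySem.Str.isIn n hint)) remaining).symm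

-- A's fold over the name set builds exactly the filtered name list
lemma foldl_add_eq_filter (q : String → Bool) :
    ∀ (names : List String) (acc : List String), names.Nodup → (∀ t ∈ names, t ∉ acc) →
      names.foldl (fun acc t => if q t then PySem.Set.add acc t else acc) acc
        = acc ++ names.filter q := by
  intro names
  induction names with
  | nil => intro acc _ _; simp
  | cons a t ih =>
    intro acc hnd hdis
    have ha : a ∉ acc := hdis a List.mem_cons_self
    have hnd' := (List.nodup_cons.mp hnd)
    by_cases hq : q a = true
    · have hadd : PySem.Set.add acc a = acc ++ [a] := by
        simp [PySem.Set.add, List.contains_eq_mem, ha]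
      have hdis' : ∀ x ∈ t, x ∉ acc ++ [a] := by
        intro x hx
        simp only [List.mem_append, List.mem_singleton]
        rintro (h | rfl)
        · exact hdis x (List.mem_cons_of_mem _ hx) h
        · exact hnd'.1 hx
      simp only [List.foldl_cons, hq, if_pos, hadd]
      rw [ih (acc ++ [a]) hnd'.2 hdis']
      simp [hq]
    · simp only [List.foldl_cons, hq]
      rw [if_neg (by simp), ih acc hnd'.2 (fun x hx => hdis x (List.mem_cons_of_mem _ hx))]
      simp [hq]

-- ===== VERDICT =====
theorem extract_typing_imports_spec : Claim_equal_extract_typing_imports := by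
  intro type_hints _
  unfold Spec_extract_typing_imports extract_typing_imports extract_typing_imports_alt
  set q : String → Bool := fun t => type_hints.any (fun hint => PySem.Str.isIn t hint) with hq
  rw [foldl_add_eq_filter q pvNamesA [] (by decide) (by simp)]
  rw [List.nil_append]
  have hfound : (pvLoopB type_hints [] pvNamesB).Perm (pvNamesB.filter q) := by
    simpa [hq] using loopB_perm type_hints [] pvNamesB
  have hpwB : pvNamesB.Pairwise (fun a b => a < b) := by
    have h := (by decide : (pvNamesB.map String.toList).Pairwise (fun a b => a < b))
    rw [List.pairwise_map] at h
    exact h.imp (fun hab => String.lt_iff_toList_lt.mpr hab)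
  have hpw : (pvNamesB.filter q).Pairwise (fun a b => a < b) :=
    hpwB.sublist List.filter_sublist
  have hpermA : (pvNamesB.filter q).Perm (pvNamesA.filter q) :=
    List.Perm.filter q (by decide : pvNamesB.Perm pvNamesA)
  have hsortA : PySem.List.sorted (pvNamesA.filter q) (fun x => x) = pvNamesB.filter q :=
    PySem.List.sorted_eq_of_perm_of_pairwise_lt (pvNamesA.filter q) (pvNamesB.filter q)
      (fun x => x) hpermA hpw
  have hsortB : PySem.List.sorted (pvLoopB type_hints [] pvNamesB) (fun x => x)
      = pvNamesB.filter q :=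
    PySem.List.sorted_eq_of_perm_of_pairwise_lt _ (pvNamesB.filter q)
      (fun x => x) hfound.symm hpw
  by_cases hnil : pvNamesB.filter q = []
  · have hAnil : pvNamesA.filter q = [] := (hnil ▸ hpermA).symm.eq_nil
    have hBnil : pvLoopB type_hints [] pvNamesB = [] := (hnil ▸ hfound).eq_nil
    simp [hAnil, hBnil]
  · have hAnil : pvNamesA.filter q ≠ [] := fun h => hnil ((h ▸ hpermA).eq_nil)
    have hBnil : pvLoopB type_hints [] pvNamesB ≠ [] := fun h =>
      hnil ((hfound.symm.trans (by simp [h])).eq_nil)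
    simp [hAnil, hBnil, hsortA, hsortB]
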